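-- pv_equiv track=rewrite | github.com/tylanmm/comp_prog | kattis/solved/natjecanje/natjecanje2.py | dfs
-- ===== SOURCE A (Python) =====
-- def dfs(state, i, amt):
--     if i == len(state):
--         return amt
--     if state[i] != 2:
--         return dfs(state, i+1, amt)
--
--     left = right = amt
--     if i != 0 and state[i-1] == 0:
--         left = dfs(state, i+1, amt-1)
--     if i < len(state) - 1 and state[i+1] == 0:
--         state[i+1] = 1
--         right = dfs(state, i+1, amt-1)
--         state[i+1] = 0
--     return min(left, right)
-- ===== SOURCE B (Python) =====
-- def dfs(state, i, amt):
--     # One left-to-right greedy pass: fix each broken (2) slot by borrowing from an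
--     # unconsumed left 0, else from a right 0 (marking it consumed); a stuck 2 stops
--     # the scan, matching A's early return.
--     n = len(state)
--     fixes = 0
--     used = -1
--     j = i
--     while j < n:
--         if state[j] == 2:
--             if j > 0 and state[j - 1] == 0 and used != j - 1:
--                 fixes += 1
--             elif j < n - 1 and state[j + 1] == 0:
--                 fixes += 1
--                 used = j + 1
--             else:
--                 return amt - fixes
--         j += 1
--     return amt - fixes
-- ===== Notes on version B (the rewrite author's own statement) =====
-- stated objective: faster
-- what changed: Replaces A's exponential DFS over left/right borrow choices (with list mutation and backtracking) by a single left-to-right greedy pass that borrows from an unconsumed left 0 first, else a right 0, tracking the one consumed index.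
-- outside the precondition, e.g. on dfs([0, 2], -1, 5): A returns 3, B returns 4; on dfs([1, 2], 3, 5): A raises IndexError, B returns 5
import Mathlib
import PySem

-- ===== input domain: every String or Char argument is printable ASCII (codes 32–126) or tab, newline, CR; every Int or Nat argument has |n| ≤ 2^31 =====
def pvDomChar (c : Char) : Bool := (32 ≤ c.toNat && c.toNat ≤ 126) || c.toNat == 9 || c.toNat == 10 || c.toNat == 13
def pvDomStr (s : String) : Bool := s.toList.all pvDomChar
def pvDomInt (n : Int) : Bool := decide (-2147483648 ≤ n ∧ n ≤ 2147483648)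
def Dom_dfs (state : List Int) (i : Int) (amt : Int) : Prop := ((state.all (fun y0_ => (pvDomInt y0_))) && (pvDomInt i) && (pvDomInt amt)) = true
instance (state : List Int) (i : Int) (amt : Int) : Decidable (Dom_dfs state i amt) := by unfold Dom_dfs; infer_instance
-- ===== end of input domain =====

-- B replaces A's exponential DFS over borrow choices by one left-to-right greedy pass
-- (borrow from the left neighbour first, else the right, remembering the consumed index).
-- A temporarily mutates `state` but always restores it before returning; B never mutates it.

-- ===== PORT A =====
def dfs (state : List Int) (i : Int) (amt : Int) : Int :=
  if i = (state.length : Int) then amt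
  else if h : 0 ≤ i ∧ i < (state.length : Int) then
    -- state[i]
    if (PySem.List.pyGet? state i).getD 0 ≠ 2 then dfs state (i + 1) amt
    else
      let left : Int :=
        if i ≠ 0 ∧ (PySem.List.pyGet? state (i - 1)).getD 0 = 0 then dfs state (i + 1) (amt - 1)
        else amt
      let right : Int :=
        if i < (state.length : Int) - 1 ∧ (PySem.List.pyGet? state (i + 1)).getD 0 = 0 then
          -- state[i+1] = 1; recurse; state[i+1] = 0  (the recursion sees the mutated list)
          dfs (state.set (i + 1).toNat 1) (i + 1) (amt - 1)
        else amt
      min left right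
  else 0  -- unreachable under Pre_ (Python raises IndexError / wraps for i outside [0, len])
termination_by ((state.length : Int) + 1 - i).toNat
decreasing_by all_goals simp_all [List.length_set] <;> omega

-- ===== PORT B =====
-- the while-loop of Source B; returns the final `fixes` (the early `return amt - fixes` is the `fixes` exit)
def altLoop (state : List Int) (n : Int) (j : Int) (used : Int) (fixes : Int) : Int :=
  if h : j < n then
    if (PySem.List.pyGet? state j).getD 0 = 2 then
      if j > 0 ∧ (PySem.List.pyGet? state (j - 1)).getD 0 = 0 ∧ used ≠ j - 1 then
        altLoop state n (j + 1) used (fixes + 1)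
      else if j < n - 1 ∧ (PySem.List.pyGet? state (j + 1)).getD 0 = 0 then
        altLoop state n (j + 1) (j + 1) (fixes + 1)
      else fixes
    else altLoop state n (j + 1) used fixes
  else fixes
termination_by (n - j).toNat
decreasing_by all_goals omega

def dfs_alt (state : List Int) (i : Int) (amt : Int) : Int :=
  amt - altLoop state (state.length : Int) i (-1) 0

-- ===== PRECONDITION & SPEC =====
-- Pre_ excludes i > len(state), where A raises IndexError, and i < 0, which is outside the
-- natural domain of this scan (A's value there is an artefact of Python's negative-index wraparound).
def Pre_dfs (state : List Int) (i : Int) (amt : Int) : Prop := 0 ≤ i ∧ i ≤ (state.length : Int)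
instance (state : List Int) (i : Int) (amt : Int) : Decidable (Pre_dfs state i amt) := by unfold Pre_dfs; infer_instance
def pvWitness_dfs : List Int × Int × Int := ([2, 0, 1, 2, 2, 0], 0, 3)
def Spec_dfs (state : List Int) (i : Int) (amt : Int) (out : Int) : Prop := out = dfs_alt state i amt
instance (state : List Int) (i : Int) (amt : Int) (out : Int) : Decidable (Spec_dfs state i amt out) := by unfold Spec_dfs; infer_instance

-- ===== CLAIM (what is proved, stated in full; the proofs are below) =====
def Claim_equal_dfs : Prop := ∀ (state : List Int) (i : Int) (amt : Int), Dom_dfs state i amt → Pre_dfs state i amt → Spec_dfs state i amt (dfs state i amt)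

-- ===== LEMMAS AND PROOFS =====

-- the number of fixes A's DFS achieves (proof-only helper mirroring dfs's recursion)
def Fv (state : List Int) (i : Int) : Int :=
  if h : 0 ≤ i ∧ i < (state.length : Int) then
    if (PySem.List.pyGet? state i).getD 0 ≠ 2 then Fv state (i + 1)
    else
      max (if i ≠ 0 ∧ (PySem.List.pyGet? state (i - 1)).getD 0 = 0 then 1 + Fv state (i + 1) else 0)
          (if i < (state.length : Int) - 1 ∧ (PySem.List.pyGet? state (i + 1)).getD 0 = 0 then
             1 + Fv (state.set (i + 1).toNat 1) (i + 1) else 0)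
  else 0
termination_by ((state.length : Int) - i).toNat
decreasing_by all_goals simp_all [List.length_set] <;> omega

theorem pg_eq (s : List Int) (i : Int) (h : 0 ≤ i) :
    (PySem.List.pyGet? s i).getD 0 = s.getD i.toNat 0 := by
  rw [PySem.List.pyGet?_of_nonneg s h, List.getD_eq_getElem?_getD]

theorem Fv_nonneg (state : List Int) (i : Int) : 0 ≤ Fv state i := by
  induction state, i using Fv.induct with
  | case1 s i h hne ih => rw [Fv, dif_pos h, if_pos hne]; exact ih
  | case2 s i h hne ih1 ih2 =>
      rw [Fv, dif_pos h, if_neg hne]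
      have h1 : (0:Int) ≤ if i < (s.length : Int) - 1 ∧ (PySem.List.pyGet? s (i + 1)).getD 0 = 0 then
          1 + Fv (s.set (i + 1).toNat 1) (i + 1) else 0 := by
        split_ifs with hc
        · omega
        · omega
      exact le_max_of_le_right h1
  | case3 s i h => rw [Fv, dif_neg h]

theorem dfs_eq_amt_sub_Fv : ∀ (state : List Int) (i : Int) (amt : Int),
    0 ≤ i → i ≤ (state.length : Int) → dfs state i amt = amt - Fv state i := by
  intro state i amt
  induction state, i, amt using dfs.induct with
  | case1 s amt => intro h0 h1; rw [dfs, if_pos rfl, Fv, dif_neg (by omega)]; ring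
  | case2 s i amt hne hg hget ih =>
      intro h0 h1
      rw [dfs, if_neg hne, dif_pos hg, if_pos hget, Fv, dif_pos hg, if_pos hget]
      exact ih (by omega) (by omega)
  | case3 s i amt hne hg hget ihL ihR =>
      intro h0 h1
      rw [dfs, if_neg hne, dif_pos hg, if_neg hget, Fv, dif_pos hg, if_neg hget]
      dsimp only
      split_ifs with hl hr hr
      · rw [ihL (by omega) (by omega), ihR hr (by omega) (by simp; omega)]; omega
      · rw [ihL (by omega) (by omega)]; omega
      · rw [ihR hr (by omega) (by simp; omega)]; omega
      · omega
  | case4 s i amt hne hg => intro h0 h1; omega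

theorem getD_set_self (l : List Int) (k : Nat) (a : Int) (h : k < l.length) :
    (l.set k a).getD k 0 = a := by
  simp [List.getD_eq_getElem?_getD, List.getElem?_set, h]

theorem getD_set_ne (l : List Int) (k m : Nat) (a : Int) (h : k ≠ m) :
    (l.set k a).getD m 0 = l.getD m 0 := by
  simp [List.getD_eq_getElem?_getD, List.getElem?_set, h]

def AvLe (s' s : List Int) : Prop :=
  s'.length = s.length ∧ ∀ m : Nat, s'.getD m 0 = s.getD m 0 ∨ (s.getD m 0 = 0 ∧ s'.getD m 0 = 1)

theorem Fv_mono_aux : ∀ (n : Nat) (s' s : List Int) (j : Int),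
    ((s.length : Int) - j).toNat ≤ n → AvLe s' s → Fv s' j ≤ Fv s j := by
  intro n
  induction n with
  | zero =>
    intro s' s j hm h
    have hlen := h.1
    rw [Fv.eq_def s' j, Fv.eq_def s j, dif_neg (by omega), dif_neg (by omega)]
  | succ n ih =>
    intro s' s j hm h
    have hlen := h.1
    by_cases hg : 0 ≤ j ∧ j < (s.length : Int)
    · have hg' : 0 ≤ j ∧ j < (s'.length : Int) := by omega
      have hj := h.2 j.toNat
      rw [Fv.eq_def s' j, Fv.eq_def s j, dif_pos hg', dif_pos hg, pg_eq s j hg.1, pg_eq s' j hg.1]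
      by_cases h2 : s.getD j.toNat 0 = 2
      · have h2' : s'.getD j.toNat 0 = 2 := by rcases hj with h' | h' <;> omega
        rw [if_neg (not_not_intro h2'), if_neg (not_not_intro h2)]
        have hmn : ((s.length : Int) - (j + 1)).toNat ≤ n := by omega
        have ihm : Fv s' (j + 1) ≤ Fv s (j + 1) := ih s' s (j + 1) hmn h
        refine max_le_max ?_ ?_
        · by_cases hc' : j ≠ 0 ∧ (PySem.List.pyGet? s' (j - 1)).getD 0 = 0
          · have hj1 := h.2 (j - 1).toNat
            have hc : j ≠ 0 ∧ (PySem.List.pyGet? s (j - 1)).getD 0 = 0 := by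
              refine ⟨hc'.1, ?_⟩
              have := hc'.2
              rw [pg_eq s' (j - 1) (by omega)] at this
              rw [pg_eq s (j - 1) (by omega)]
              omega
            rw [if_pos hc', if_pos hc]; omega
          · rw [if_neg hc']
            have := Fv_nonneg s (j + 1)
            split_ifs <;> omega
        · by_cases hc' : j < (s'.length : Int) - 1 ∧ (PySem.List.pyGet? s' (j + 1)).getD 0 = 0
          · have hj1 := h.2 (j + 1).toNat
            have hs'0 : s'.getD (j + 1).toNat 0 = 0 := by
              have := hc'.2; rwa [pg_eq s' (j + 1) (by omega)] at this
            have hs0 : s.getD (j + 1).toNat 0 = 0 := by omega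
            have hc : j < (s.length : Int) - 1 ∧ (PySem.List.pyGet? s (j + 1)).getD 0 = 0 := by
              refine ⟨by omega, ?_⟩; rw [pg_eq s (j + 1) (by omega)]; exact hs0
            rw [if_pos hc', if_pos hc]
            have hrel : AvLe (s'.set (j + 1).toNat 1) (s.set (j + 1).toNat 1) := by
              refine ⟨by simp [hlen], ?_⟩
              intro m
              by_cases hm' : (j + 1).toNat = m
              · subst hm'
                by_cases hin : (j + 1).toNat < s.length
                · rw [getD_set_self _ _ _ (by omega), getD_set_self _ _ _ (by omega)]; left; rfl
                · rw [List.set_eq_of_length_le (by omega), List.set_eq_of_length_le (by omega)]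
                  exact h.2 _
              · rw [getD_set_ne _ _ _ _ hm', getD_set_ne _ _ _ _ hm']; exact h.2 m
            have := ih (s'.set (j + 1).toNat 1) (s.set (j + 1).toNat 1) (j + 1)
              (by simp; omega) hrel
            omega
          · rw [if_neg hc']
            have := Fv_nonneg (s.set (j + 1).toNat 1) (j + 1)
            split_ifs <;> omega
      · have h2' : s'.getD j.toNat 0 ≠ 2 := by rcases hj with h' | h' <;> omega
        rw [if_pos h2', if_pos h2]
        exact ih s' s (j + 1) (by omega) h
    · rw [Fv.eq_def s' j, Fv.eq_def s j, dif_neg (by omega), dif_neg (by omega)]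

theorem Fv_agree_aux : ∀ (n : Nat) (s₁ s₂ : List Int) (j : Int),
    ((s₁.length : Int) - j).toNat ≤ n → s₁.length = s₂.length →
    (∀ m : Nat, (j - 1 : Int) ≤ (m : Int) → s₁.getD m 0 = s₂.getD m 0) →
    Fv s₁ j = Fv s₂ j := by
  intro n
  induction n with
  | zero =>
    intro s₁ s₂ j hm hl ha
    rw [Fv.eq_def s₁ j, Fv.eq_def s₂ j, dif_neg (by omega), dif_neg (by omega)]
  | succ n ih =>
    intro s₁ s₂ j hm hl ha
    by_cases hg : 0 ≤ j ∧ j < (s₁.length : Int)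
    · have hv : s₁.getD j.toNat 0 = s₂.getD j.toNat 0 := ha j.toNat (by omega)
      rw [Fv.eq_def s₁ j, Fv.eq_def s₂ j, dif_pos hg, dif_pos (show 0 ≤ j ∧ j < (s₂.length : Int) by omega),
          pg_eq s₁ j hg.1, pg_eq s₂ j hg.1, hv]
      have ihrec : Fv s₁ (j + 1) = Fv s₂ (j + 1) :=
        ih s₁ s₂ (j + 1) (by omega) hl (fun m hm' => ha m (by omega))
      by_cases h2 : s₂.getD j.toNat 0 ≠ 2
      · rw [if_pos h2, if_pos h2]; exact ihrec
      · rw [if_neg h2, if_neg h2]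
        have ihset : Fv (s₁.set (j + 1).toNat 1) (j + 1) = Fv (s₂.set (j + 1).toNat 1) (j + 1) := by
          refine ih _ _ (j + 1) (by simp; omega) (by simp [hl]) ?_
          intro m hm'
          by_cases he : (j + 1).toNat = m
          · subst he
            by_cases hin : (j + 1).toNat < s₁.length
            · rw [getD_set_self _ _ _ hin, getD_set_self _ _ _ (by omega)]
            · rw [List.set_eq_of_length_le (by omega), List.set_eq_of_length_le (by omega)]
              exact ha _ (by omega)
          · rw [getD_set_ne _ _ _ _ he, getD_set_ne _ _ _ _ he]
            exact ha m (by omega)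
        congr 1
        · by_cases hj0 : j = 0
          · rw [if_neg (by simp [hj0]), if_neg (by simp [hj0])]
          · have hv1 : (PySem.List.pyGet? s₁ (j - 1)).getD 0 = (PySem.List.pyGet? s₂ (j - 1)).getD 0 := by
              rw [pg_eq _ _ (by omega), pg_eq _ _ (by omega)]
              exact ha (j - 1).toNat (by omega)
            rw [hv1, ihrec]
        · have hv1 : (PySem.List.pyGet? s₁ (j + 1)).getD 0 = (PySem.List.pyGet? s₂ (j + 1)).getD 0 := by
            rw [pg_eq _ _ (by omega), pg_eq _ _ (by omega)]
            exact ha (j + 1).toNat (by omega)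
          rw [hv1, ihset]
          have hll : (s₁.length : Int) = (s₂.length : Int) := by omega
          rw [hll]
    · rw [Fv.eq_def s₁ j, Fv.eq_def s₂ j, dif_neg (by omega), dif_neg (by omega)]

def mark (used : Int) (state : List Int) : List Int :=
  if 0 ≤ used then state.set used.toNat 1 else state

theorem mark_length (u : Int) (s : List Int) : (mark u s).length = s.length := by
  unfold mark; split <;> simp

theorem mark_getD_self (u : Int) (s : List Int) (h0 : 0 ≤ u) (h1 : u < (s.length : Int)) :
    (mark u s).getD u.toNat 0 = 1 := by
  unfold mark; rw [if_pos h0]; exact getD_set_self _ _ _ (by omega)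

theorem mark_getD_other (u : Int) (s : List Int) (m : Nat) (h : 0 ≤ u → u.toNat ≠ m) :
    (mark u s).getD m 0 = s.getD m 0 := by
  unfold mark; split_ifs with h0
  · exact getD_set_ne _ _ _ _ (h h0)
  · rfl

theorem Fv_mono (s' s : List Int) (j : Int) (h : AvLe s' s) : Fv s' j ≤ Fv s j :=
  Fv_mono_aux ((s.length : Int) - j).toNat s' s j le_rfl h

theorem Fv_agree (s₁ s₂ : List Int) (j : Int) (hl : s₁.length = s₂.length)
    (ha : ∀ m : Nat, (j - 1 : Int) ≤ (m : Int) → s₁.getD m 0 = s₂.getD m 0) :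
    Fv s₁ j = Fv s₂ j :=
  Fv_agree_aux ((s₁.length : Int) - j).toNat s₁ s₂ j le_rfl hl ha

theorem altLoop_eq_aux : ∀ (n : Nat) (s : List Int) (j used fixes : Int),
    ((s.length : Int) - j).toNat ≤ n → 0 ≤ j → j ≤ (s.length : Int) → -1 ≤ used → used ≤ j →
    (used = j → s.getD used.toNat 0 = 0) →
    altLoop s (s.length : Int) j used fixes = fixes + Fv (mark used s) j := by
  intro n
  induction n with
  | zero =>
    intro s j used fixes hm h0 h1 hu1 hu2 hu3
    rw [altLoop.eq_def, dif_neg (by omega), Fv.eq_def,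
        dif_neg (by rw [mark_length]; omega)]
    omega
  | succ n ih =>
    intro s j used fixes hm h0 h1 hu1 hu2 hu3
    by_cases hjl : j < (s.length : Int)
    · rw [altLoop.eq_def, dif_pos hjl, pg_eq s j h0, Fv.eq_def,
          dif_pos (by rw [mark_length]; omega), pg_eq (mark used s) j h0]
      by_cases hA : used = j
      · have hsj : s.getD j.toNat 0 = 0 := by
          have := hu3 hA; rwa [show used.toNat = j.toNat by omega] at this
        have hmkj : (mark used s).getD j.toNat 0 = 1 := by
          have := mark_getD_self used s (by omega) (by omega)
          rwa [show used.toNat = j.toNat by omega] at this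
        rw [if_neg (by omega), if_pos (by rw [hmkj]; omega)]
        rw [ih s (j + 1) used fixes (by omega) (by omega) (by omega) (by omega) (by omega)
            (by intro h'; omega)]
      · have hmkj : (mark used s).getD j.toNat 0 = s.getD j.toNat 0 :=
          mark_getD_other used s j.toNat (by omega)
        rw [hmkj]
        by_cases h2 : s.getD j.toNat 0 = 2
        · rw [if_pos h2, if_neg (not_not_intro h2)]
          by_cases hc1 : j > 0 ∧ (PySem.List.pyGet? s (j - 1)).getD 0 = 0 ∧ used ≠ j - 1
          · have hsv1 : s.getD (j - 1).toNat 0 = 0 := by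
              have := hc1.2.1; rwa [pg_eq s (j - 1) (by omega)] at this
            have hL1 : j ≠ 0 ∧ (PySem.List.pyGet? (mark used s) (j - 1)).getD 0 = 0 := by
              refine ⟨by omega, ?_⟩
              rw [pg_eq _ _ (by omega), mark_getD_other used s (j - 1).toNat (by omega)]
              exact hsv1
            rw [if_pos hc1, if_pos hL1]
            have hRle : (if j < ((mark used s).length : Int) - 1 ∧
                (PySem.List.pyGet? (mark used s) (j + 1)).getD 0 = 0 then
                1 + Fv ((mark used s).set (j + 1).toNat 1) (j + 1) else 0) ≤
                1 + Fv (mark used s) (j + 1) := by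
              split_ifs with hc2
              · have hmono : Fv ((mark used s).set (j + 1).toNat 1) (j + 1) ≤ Fv (mark used s) (j + 1) := by
                  apply Fv_mono
                  refine ⟨by simp, ?_⟩
                  intro m
                  by_cases he : (j + 1).toNat = m
                  · subst he
                    have hml := mark_length used s
                    have hin : (j + 1).toNat < (mark used s).length := by omega
                    refine Or.inr ⟨?_, getD_set_self _ _ _ hin⟩
                    have := hc2.2; rwa [pg_eq _ _ (by omega)] at this
                  · rw [getD_set_ne _ _ _ _ he]; left; rfl
                omega
              · have := Fv_nonneg (mark used s) (j + 1); omega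
            rw [max_eq_left hRle]
            rw [ih s (j + 1) used (fixes + 1) (by omega) (by omega) (by omega) (by omega)
                (by omega) (by intro h'; omega)]
            ring
          · rw [if_neg hc1]
            have hL1n : ¬(j ≠ 0 ∧ (PySem.List.pyGet? (mark used s) (j - 1)).getD 0 = 0) := by
              rintro ⟨hj0, hz⟩
              rw [pg_eq _ _ (by omega)] at hz
              by_cases hu : used = j - 1
              · have h1' : (mark used s).getD (j - 1).toNat 0 = 1 := by
                  have := mark_getD_self used s (by omega) (by omega)
                  rwa [show used.toNat = (j - 1).toNat by omega] at this
                omega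
              · rw [mark_getD_other used s (j - 1).toNat (by omega)] at hz
                exact hc1 ⟨by omega, by rw [pg_eq s (j - 1) (by omega)]; exact hz, hu⟩
            rw [if_neg hL1n]
            by_cases hc2 : j < (s.length : Int) - 1 ∧ (PySem.List.pyGet? s (j + 1)).getD 0 = 0
            · have hsv2 : s.getD (j + 1).toNat 0 = 0 := by
                have := hc2.2; rwa [pg_eq s (j + 1) (by omega)] at this
              have hL2 : j < ((mark used s).length : Int) - 1 ∧
                  (PySem.List.pyGet? (mark used s) (j + 1)).getD 0 = 0 := by
                refine ⟨by rw [mark_length]; omega, ?_⟩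
                rw [pg_eq _ _ (by omega), mark_getD_other used s (j + 1).toNat (by omega)]
                exact hsv2
              rw [if_pos hc2, if_pos hL2]
              have hnn := Fv_nonneg ((mark used s).set (j + 1).toNat 1) (j + 1)
              rw [max_eq_right (by omega)]
              have hag : Fv ((mark used s).set (j + 1).toNat 1) (j + 1) = Fv (mark (j + 1) s) (j + 1) := by
                apply Fv_agree
                · rw [List.length_set, mark_length, mark_length]
                · intro m hm'
                  by_cases he : (j + 1).toNat = m
                  · subst he
                    rw [getD_set_self _ _ _ (by rw [mark_length]; omega)]
                    have := mark_getD_self (j + 1) s (by omega) (by omega)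
                    rw [this]
                  · rw [getD_set_ne _ _ _ _ he, mark_getD_other used s m (by omega),
                        mark_getD_other (j + 1) s m (by omega)]
              rw [hag]
              rw [ih s (j + 1) (j + 1) (fixes + 1) (by omega) (by omega) (by omega) (by omega)
                  (by omega) (by intro h'; rw [show (j+1).toNat = (j+1).toNat from rfl]; exact hsv2)]
              ring
            · have hL2n : ¬(j < ((mark used s).length : Int) - 1 ∧
                  (PySem.List.pyGet? (mark used s) (j + 1)).getD 0 = 0) := by
                rintro ⟨hl2, hz⟩
                rw [mark_length] at hl2
                rw [pg_eq _ _ (by omega), mark_getD_other used s (j + 1).toNat (by omega)] at hz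
                exact hc2 ⟨hl2, by rw [pg_eq s (j + 1) (by omega)]; exact hz⟩
              rw [if_neg hc2, if_neg hL2n]
              simp
        · rw [if_neg h2, if_pos h2]
          rw [ih s (j + 1) used fixes (by omega) (by omega) (by omega) (by omega) (by omega)
              (by intro h'; omega)]
    · rw [altLoop.eq_def, dif_neg (by omega), Fv.eq_def, dif_neg (by rw [mark_length]; omega)]
      omega


-- ===== VERDICT (by name: the statement is the Claim_ definition above) =====
theorem dfs_spec : Claim_equal_dfs := by
  intro state i amt _ hpre
  obtain ⟨h0, h1⟩ := hpre
  unfold Spec_dfs dfs_alt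
  rw [dfs_eq_amt_sub_Fv state i amt h0 h1,
      altLoop_eq_aux ((state.length : Int) - i).toNat state i (-1) 0 le_rfl h0 h1 (by omega)
        (by omega) (by intro h'; omega)]
  have hmk : mark (-1) state = state := by unfold mark; rw [if_neg (by omega)]
  rw [hmk]
  ring
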